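-- pv_equiv track=rewrite | github.com/Morovanuuu/Proiect-Prelucrarea-Imaginilor- | image_filters.py | get_moments2
-- ===== SOURCE A (Python) =====
-- def get_moments2(m):
--     """Calculeaza momentele spatiale de ordinul 2."""
--     h, w = len(m), len(m[0])
--     M20, M02, M11 = 0, 0, 0
--     for y in range(h):
--         for x in range(w):
--             r, g, b = m[y][x]
--             I = 255 - ((r + g + b) // 3)
--             M20 += (x ** 2) * I
--             M02 += (y ** 2) * I
--             M11 += x * y * I
--     return M20, M02, M11
-- ===== SOURCE B (Python) =====
-- def get_moments2(m):
--     """Calculeaza momentele spatiale de ordinul 2 via 1-D projections."""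
--     w = len(m[0])
--     rowI = []   # rowI[y] = sum_x I
--     rowX = []   # rowX[y] = sum_x x*I
--     M20 = 0
--     for row in m:
--         sI = sX = sXX = 0
--         for x in range(w):
--             r, g, b = row[x]
--             I = 255 - ((r + g + b) // 3)
--             sI += I
--             sX += x * I
--             sXX += x * x * I
--         rowI.append(sI)
--         rowX.append(sX)
--         M20 += sXX
--     M02 = sum(y * y * v for y, v in enumerate(rowI))
--     M11 = sum(y * v for y, v in enumerate(rowX))
--     return M20, M02, M11
-- ===== Notes on version B (the rewrite author's own statement) =====
-- stated objective: alternative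
-- what changed: A fuses one triple accumulator (M20,M02,M11) updated with x^2, y^2, x*y weights at every pixel; B builds 1-D row projections (sum of I and of x*I per row) plus per-row x^2-weighted sums in one table-building pass, then applies the y-weights in separate enumerate passes.
import Mathlib
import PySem

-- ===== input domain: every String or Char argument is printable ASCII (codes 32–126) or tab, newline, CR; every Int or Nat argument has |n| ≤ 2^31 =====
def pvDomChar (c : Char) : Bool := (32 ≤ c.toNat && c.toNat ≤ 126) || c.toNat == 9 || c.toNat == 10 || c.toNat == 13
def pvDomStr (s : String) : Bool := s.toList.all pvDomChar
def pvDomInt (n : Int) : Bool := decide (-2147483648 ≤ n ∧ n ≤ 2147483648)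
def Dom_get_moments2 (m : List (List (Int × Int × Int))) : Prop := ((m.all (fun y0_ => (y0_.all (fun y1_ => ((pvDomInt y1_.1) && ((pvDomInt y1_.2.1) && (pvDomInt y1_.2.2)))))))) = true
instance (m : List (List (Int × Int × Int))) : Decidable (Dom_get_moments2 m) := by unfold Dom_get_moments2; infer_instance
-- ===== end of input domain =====

-- B replaces A's fused per-pixel triple accumulator (x^2-, y^2-, x*y-weighted at every pixel)
-- by 1-D row projections built in one table pass, with the y-weights applied in separate
-- enumerate passes; same cost, different decomposition.

-- ===== PORT A =====
def get_moments2 (m : List (List (Int × Int × Int))) : Int × Int × Int :=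
  let h : Int := (m.length : Int)
  let w : Int := ((PySem.List.pyGetD m 0 []).length : Int)
  (PySem.List.pyRange 0 h 1).foldl (fun (acc : Int × Int × Int) y =>
    (PySem.List.pyRange 0 w 1).foldl (fun (acc : Int × Int × Int) x =>
      let p := PySem.List.pyGetD (PySem.List.pyGetD m y []) x (0, 0, 0)
      let I : Int := 255 - PySem.Int.floordiv (p.1 + p.2.1 + p.2.2) 3
      (acc.1 + x ^ 2 * I, acc.2.1 + y ^ 2 * I, acc.2.2 + x * y * I)) acc)
    ((0 : Int), (0 : Int), (0 : Int))

-- ===== PORT B =====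
-- B's inner loop: per-row sums (Σ I, Σ x*I, Σ x*x*I) over x in range(w)
def pvRowSums (w : Int) (row : List (Int × Int × Int)) : Int × Int × Int :=
  (PySem.List.pyRange 0 w 1).foldl (fun (s : Int × Int × Int) x =>
    let p := PySem.List.pyGetD row x (0, 0, 0)
    let I : Int := 255 - PySem.Int.floordiv (p.1 + p.2.1 + p.2.2) 3
    (s.1 + I, s.2.1 + x * I, s.2.2 + x * x * I)) (0, 0, 0)

def get_moments2_alt (m : List (List (Int × Int × Int))) : Int × Int × Int :=
  let w : Int := ((PySem.List.pyGetD m 0 []).length : Int)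
  let st := m.foldl (fun (st : List Int × List Int × Int) row =>
      let s := pvRowSums w row
      (st.1 ++ [s.1], st.2.1 ++ [s.2.1], st.2.2 + s.2.2)) (([] : List Int), ([] : List Int), (0 : Int))
  let M02 := (PySem.List.enumerate st.1 0).foldl (fun (a : Int) (p : Int × Int) => a + p.1 * p.1 * p.2) 0
  let M11 := (PySem.List.enumerate st.2.1 0).foldl (fun (a : Int) (p : Int × Int) => a + p.1 * p.2) 0
  (st.2.2, M02, M11)

-- ===== PRECONDITION & SPEC =====
-- Pre_ excludes exactly the inputs on which Python A raises IndexError: the empty image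
-- (m[0]) and ragged images with some row shorter than the first row (m[y][x]).
def Pre_get_moments2 (m : List (List (Int × Int × Int))) : Prop :=
  m ≠ [] ∧ ∀ row ∈ m, (m.headD []).length ≤ row.length
instance (m : List (List (Int × Int × Int))) : Decidable (Pre_get_moments2 m) := by unfold Pre_get_moments2; infer_instance

def pvWitness_get_moments2 : (List (List (Int × Int × Int))) :=
  [[(10, 20, 30), (0, 0, 0)], [(255, 255, 255), (1, 2, 3)]]

def Spec_get_moments2 (m : List (List (Int × Int × Int))) (out : Int × Int × Int) : Prop := out = get_moments2_alt m
instance (m : List (List (Int × Int × Int))) (out : Int × Int × Int) : Decidable (Spec_get_moments2 m out) := by unfold Spec_get_moments2; infer_instance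

-- ===== CLAIM (what is proved, stated in full; the proofs are below) =====
def Claim_equal_get_moments2 : Prop := ∀ (m : List (List (Int × Int × Int))), Dom_get_moments2 m → Pre_get_moments2 m → Spec_get_moments2 m (get_moments2 m)

-- ===== LEMMAS AND PROOFS =====

-- intensity of one pixel (proof-side abbreviation)
def pvI (p : Int × Int × Int) : Int := 255 - PySem.Int.floordiv (p.1 + p.2.1 + p.2.2) 3

def pvPix (m : List (List (Int × Int × Int))) (y x : Int) : Int :=
  pvI (PySem.List.pyGetD (PySem.List.pyGetD m y []) x (0, 0, 0))

-- a fold whose step adds (f x, g x, h x) componentwise is the triple of sums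
theorem pv_foldl_triple_add {α : Type} (f g h : α → Int) :
    ∀ (L : List α) (a : Int × Int × Int),
      L.foldl (fun (a : Int × Int × Int) x => (a.1 + f x, a.2.1 + g x, a.2.2 + h x)) a
        = (a.1 + (L.map f).sum, a.2.1 + (L.map g).sum, a.2.2 + (L.map h).sum) := by
  intro L
  induction L with
  | nil => intro a; simp
  | cons x t ih =>
    intro a
    simp only [List.foldl_cons, List.map_cons, List.sum_cons, ih]
    refine Prod.ext ?_ (Prod.ext ?_ ?_) <;> (simp; ring)

-- the same, with the step given only extensionally (for A's outer loop, whose step is itself a fold)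
theorem pv_foldl_triple_addG {α : Type} (step : (Int × Int × Int) → α → (Int × Int × Int))
    (f g h : α → Int)
    (hstep : ∀ a x, step a x = (a.1 + f x, a.2.1 + g x, a.2.2 + h x)) :
    ∀ (L : List α) (a : Int × Int × Int),
      L.foldl step a = (a.1 + (L.map f).sum, a.2.1 + (L.map g).sum, a.2.2 + (L.map h).sum) := by
  intro L
  induction L with
  | nil => intro a; simp
  | cons x t ih =>
    intro a
    simp only [List.foldl_cons, List.map_cons, List.sum_cons, ih, hstep]
    refine Prod.ext ?_ (Prod.ext ?_ ?_) <;> (simp; ring)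

-- closed form of B's per-row sums
theorem pv_rowSums_eq (w : Int) (row : List (Int × Int × Int)) :
    pvRowSums w row =
      (((PySem.List.pyRange 0 w 1).map (fun x => pvI (PySem.List.pyGetD row x (0,0,0)))).sum,
       ((PySem.List.pyRange 0 w 1).map (fun x => x * pvI (PySem.List.pyGetD row x (0,0,0)))).sum,
       ((PySem.List.pyRange 0 w 1).map (fun x => x * x * pvI (PySem.List.pyGetD row x (0,0,0)))).sum) := by
  unfold pvRowSums
  have h := pv_foldl_triple_add (fun x => pvI (PySem.List.pyGetD row x (0,0,0)))
        (fun x => x * pvI (PySem.List.pyGetD row x (0,0,0)))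
        (fun x => x * x * pvI (PySem.List.pyGetD row x (0,0,0)))
        (PySem.List.pyRange 0 w 1) (0,0,0)
  simp only [zero_add] at h
  exact h

-- closed form of A: triple of weighted double sums
theorem pv_A_eq (m : List (List (Int × Int × Int))) :
    get_moments2 m =
      (((PySem.List.pyRange 0 (m.length : Int) 1).map (fun y =>
          ((PySem.List.pyRange 0 ((PySem.List.pyGetD m 0 []).length : Int) 1).map (fun x => x ^ 2 * pvPix m y x)).sum)).sum,
       ((PySem.List.pyRange 0 (m.length : Int) 1).map (fun y =>
          ((PySem.List.pyRange 0 ((PySem.List.pyGetD m 0 []).length : Int) 1).map (fun x => y ^ 2 * pvPix m y x)).sum)).sum,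
       ((PySem.List.pyRange 0 (m.length : Int) 1).map (fun y =>
          ((PySem.List.pyRange 0 ((PySem.List.pyGetD m 0 []).length : Int) 1).map (fun x => x * y * pvPix m y x)).sum)).sum) := by
  have hinner : ∀ (y : Int) (a : Int × Int × Int),
      (PySem.List.pyRange 0 ((PySem.List.pyGetD m 0 []).length : Int) 1).foldl
        (fun (acc : Int × Int × Int) x =>
          let p := PySem.List.pyGetD (PySem.List.pyGetD m y []) x (0, 0, 0)
          let I : Int := 255 - PySem.Int.floordiv (p.1 + p.2.1 + p.2.2) 3
          (acc.1 + x ^ 2 * I, acc.2.1 + y ^ 2 * I, acc.2.2 + x * y * I)) a =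
      (a.1 + ((PySem.List.pyRange 0 ((PySem.List.pyGetD m 0 []).length : Int) 1).map (fun x => x ^ 2 * pvPix m y x)).sum,
       a.2.1 + ((PySem.List.pyRange 0 ((PySem.List.pyGetD m 0 []).length : Int) 1).map (fun x => y ^ 2 * pvPix m y x)).sum,
       a.2.2 + ((PySem.List.pyRange 0 ((PySem.List.pyGetD m 0 []).length : Int) 1).map (fun x => x * y * pvPix m y x)).sum) := by
    intro y a
    exact pv_foldl_triple_addG _ (fun x => x ^ 2 * pvPix m y x) (fun x => y ^ 2 * pvPix m y x)
      (fun x => x * y * pvPix m y x) (fun a x => rfl) _ a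
  have h := pv_foldl_triple_addG
      (fun (acc : Int × Int × Int) y =>
        (PySem.List.pyRange 0 ((PySem.List.pyGetD m 0 []).length : Int) 1).foldl
          (fun (acc : Int × Int × Int) x =>
            let p := PySem.List.pyGetD (PySem.List.pyGetD m y []) x (0, 0, 0)
            let I : Int := 255 - PySem.Int.floordiv (p.1 + p.2.1 + p.2.2) 3
            (acc.1 + x ^ 2 * I, acc.2.1 + y ^ 2 * I, acc.2.2 + x * y * I)) acc)
      _ _ _ (fun a y => hinner y a) (PySem.List.pyRange 0 (m.length : Int) 1) (0, 0, 0)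
  simp only [zero_add] at h
  exact h

-- B's table-building pass, in closed form
theorem pv_foldl_table (w : Int) :
    ∀ (L : List (List (Int × Int × Int))) (a : List Int × List Int × Int),
      L.foldl (fun (st : List Int × List Int × Int) row =>
          ((st.1 ++ [(pvRowSums w row).1], st.2.1 ++ [(pvRowSums w row).2.1],
            st.2.2 + (pvRowSums w row).2.2) : List Int × List Int × Int)) a =
        (a.1 ++ L.map (fun row => (pvRowSums w row).1),
         a.2.1 ++ L.map (fun row => (pvRowSums w row).2.1),
         a.2.2 + (L.map (fun row => (pvRowSums w row).2.2)).sum) := by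
  intro L
  induction L with
  | nil => intro a; simp
  | cons x t ih =>
    intro a
    simp only [List.foldl_cons, List.map_cons, List.sum_cons, ih]
    refine Prod.ext ?_ (Prod.ext ?_ ?_) <;> (simp; try ring)

-- B's combining passes: an additive fold over enumerate of a mapped list is a weighted index sum
theorem pv_enum_sum {α : Type} (xs : List α) (f : α → Int) (d : α) (g : Int → Int → Int) :
    (PySem.List.enumerate (xs.map f) 0).foldl (fun (a : Int) (p : Int × Int) => a + g p.1 p.2) 0
      = ((PySem.List.pyRange 0 (xs.length : Int) 1).map
          (fun y => g y (f (PySem.List.pyGetD xs y d)))).sum := by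
  rw [PySem.List.enumerate_eq_map_pyRange (xs.map f) (f d)]
  rw [List.foldl_map, PySem.List.foldl_add]
  simp [PySem.List.pyGetD_map]

-- closed form of B
theorem pv_B_eq (m : List (List (Int × Int × Int))) :
    get_moments2_alt m =
      ((m.map (fun row => (pvRowSums ((PySem.List.pyGetD m 0 []).length : Int) row).2.2)).sum,
       ((PySem.List.pyRange 0 (m.length : Int) 1).map (fun y =>
          y * y * (pvRowSums ((PySem.List.pyGetD m 0 []).length : Int) (PySem.List.pyGetD m y [])).1)).sum,
       ((PySem.List.pyRange 0 (m.length : Int) 1).map (fun y =>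
          y * (pvRowSums ((PySem.List.pyGetD m 0 []).length : Int) (PySem.List.pyGetD m y [])).2.1)).sum) := by
  unfold get_moments2_alt
  dsimp only
  rw [pv_foldl_table]
  simp only [List.nil_append, zero_add]
  rw [pv_enum_sum m _ ([] : List (Int × Int × Int)) (fun y v => y * y * v),
      pv_enum_sum m _ ([] : List (Int × Int × Int)) (fun y v => y * v)]

theorem pv_main (m : List (List (Int × Int × Int))) : get_moments2 m = get_moments2_alt m := by
  rw [pv_A_eq, pv_B_eq]
  refine Prod.ext ?_ (Prod.ext ?_ ?_) <;> dsimp only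
  · -- M20
    calc ((PySem.List.pyRange 0 (m.length : Int) 1).map (fun y =>
            ((PySem.List.pyRange 0 ((PySem.List.pyGetD m 0 []).length : Int) 1).map
              (fun x => x ^ 2 * pvPix m y x)).sum)).sum
        = (((PySem.List.pyRange 0 (m.length : Int) 1).map (fun j => PySem.List.pyGetD m j [])).map
            (fun row => ((PySem.List.pyRange 0 ((PySem.List.pyGetD m 0 []).length : Int) 1).map
              (fun x => x ^ 2 * pvI (PySem.List.pyGetD row x (0, 0, 0)))).sum)).sum := by
          rw [List.map_map]; rfl
      _ = (m.map (fun row => ((PySem.List.pyRange 0 ((PySem.List.pyGetD m 0 []).length : Int) 1).map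
              (fun x => x ^ 2 * pvI (PySem.List.pyGetD row x (0, 0, 0)))).sum)).sum := by
          rw [PySem.List.map_pyGetD_pyRange_zero' m []]
      _ = _ := by
          apply congrArg
          apply List.map_congr_left
          intro row _
          rw [pv_rowSums_eq]
          apply congrArg
          apply List.map_congr_left
          intro x _
          ring
  · -- M02
    apply congrArg
    apply List.map_congr_left
    intro y _
    rw [pv_rowSums_eq]
    have h1 : (fun x => y ^ 2 * pvPix m y x)
        = (fun x => y * y * pvI (PySem.List.pyGetD (PySem.List.pyGetD m y []) x (0, 0, 0))) := by
      funext x; show y ^ 2 * pvPix m y x = _; rw [pvPix]; ring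
    rw [h1, List.sum_map_mul_left]
  · -- M11
    apply congrArg
    apply List.map_congr_left
    intro y _
    rw [pv_rowSums_eq]
    have h1 : (fun x => x * y * pvPix m y x)
        = (fun x => y * (x * pvI (PySem.List.pyGetD (PySem.List.pyGetD m y []) x (0, 0, 0)))) := by
      funext x; show x * y * pvPix m y x = _; rw [pvPix]; ring
    rw [h1, List.sum_map_mul_left]

-- ===== VERDICT (by name: the statement is the Claim_ definition above) =====
theorem get_moments2_spec : Claim_equal_get_moments2 := by
  intro m _ _
  exact pv_main m
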